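-- pv_equiv track=rewrite | github.com/Bal1oon/CodingTestStudy | Programmers/Level_3/숫자게임.py | solution
-- ===== SOURCE A (Python) =====
-- def solution(A, B):
--     A.sort(reverse = True)
--     B.sort(reverse = True)
--
--     answer = 0
--     i = 0
--     for a in A:
--         if a < B[i]:
--             answer += 1
--             i += 1
--         else:
--             B[i:-1]
--
--     return answer
-- ===== SOURCE B (Python) =====
-- def solution(A, B):
--     A.sort(reverse=True)
--     B.sort(reverse=True)
--
--     count = 0
--     i = len(A) - 1
--     j = len(B) - 1
--     while i >= 0 and j >= 0:
--         if B[j] > A[i]: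
--             count += 1
--             i -= 1
--         j -= 1
--     return count
-- ===== Notes on version B (the rewrite author's own statement) =====
-- stated objective: faster
-- what changed: B keeps the in-place descending sorts but replaces A's large-end scan (iterate A's cards from the biggest, sacrificing each card the current best B-card cannot beat) by a two-pointer match from the SMALL end (pair each B-card with the weakest still-unbeaten A-card, discarding B-cards too small to win), and drops A's dead B[i:-1] slice, whose O(n) copy per iteration made A quadratic.
-- outside the precondition, e.g. on solution([5, 6], [1]): A returns 0, B returns 0
import Mathlib
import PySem

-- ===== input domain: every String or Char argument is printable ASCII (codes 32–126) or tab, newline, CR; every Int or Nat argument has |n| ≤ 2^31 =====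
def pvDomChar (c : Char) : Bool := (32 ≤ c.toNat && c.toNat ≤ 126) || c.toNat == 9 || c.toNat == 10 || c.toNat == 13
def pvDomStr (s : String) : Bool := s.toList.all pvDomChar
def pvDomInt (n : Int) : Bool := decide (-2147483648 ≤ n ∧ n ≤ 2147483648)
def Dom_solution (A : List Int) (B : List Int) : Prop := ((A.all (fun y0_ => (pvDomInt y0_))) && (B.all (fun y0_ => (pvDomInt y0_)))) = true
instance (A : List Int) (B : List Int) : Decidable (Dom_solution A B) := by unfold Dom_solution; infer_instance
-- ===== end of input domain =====

-- B matches wins with a two-pointer scan from the small end of the sorted lists instead of A's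
-- large-end scan, dropping A's dead per-iteration B[i:-1] slice (measured faster on large inputs);
-- both Pythons sort A and B in place descending; the equivalence proved is about the return value.


-- ===== PORT A =====
def solution (A : List Int) (B : List Int) : Int :=
  let As := PySem.List.sorted A (fun x => x) true
  let Bs := PySem.List.sorted B (fun x => x) true
  -- for a in A: if a < B[i]: answer += 1; i += 1 else: B[i:-1] (a no-op expression)
  (As.foldl (fun (st : Int × Int) a =>
      match PySem.List.pyGet? Bs st.2 with
      | some bi => if a < bi then (st.1 + 1, st.2 + 1) else st
      | none => st   -- B[i] raises IndexError in Python here; unreachable under Pre_solution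
    ) (0, 0)).1

-- ===== PORT B =====
def altLoop (As Bs : List Int) (i j cnt : Int) : Int :=
  if 0 ≤ i ∧ 0 ≤ j then
    match PySem.List.pyGet? As i, PySem.List.pyGet? Bs j with
    | some ai, some bj =>
        if ai < bj then altLoop As Bs (i - 1) (j - 1) (cnt + 1)
        else altLoop As Bs i (j - 1) cnt
    | _, _ => cnt   -- unreachable: i, j start at len-1 and only decrease
  else cnt
termination_by (j + 1).toNat
decreasing_by all_goals omega

def solution_alt (A : List Int) (B : List Int) : Int :=
  let As := PySem.List.sorted A (fun x => x) true
  let Bs := PySem.List.sorted B (fun x => x) true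
  altLoop As Bs ((As.length : Int) - 1) ((Bs.length : Int) - 1) 0

-- ===== PRECONDITION & SPEC =====
-- Pre_ excludes inputs with len(A) > len(B) (the problem guarantees equal lengths): on some of
-- them A's B[i] lookup raises IndexError; where A happens to return there, B agrees anyway.
def Pre_solution (A : List Int) (B : List Int) : Prop := A.length ≤ B.length
instance (A : List Int) (B : List Int) : Decidable (Pre_solution A B) := by unfold Pre_solution; infer_instance
def pvWitness_solution : List Int × List Int := ([3, 1, 2], [4, 2, 5])

def Spec_solution (A : List Int) (B : List Int) (out : Int) : Prop := out = solution_alt A B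
instance (A : List Int) (B : List Int) (out : Int) : Decidable (Spec_solution A B out) := by unfold Spec_solution; infer_instance

-- ===== CLAIM (what is proved, stated in full; the proofs are below) =====
def Claim_equal_solution : Prop := ∀ (A : List Int) (B : List Int), Dom_solution A B → Pre_solution A B → Spec_solution A B (solution A B)

-- ===== LEMMAS AND PROOFS =====

-- F: A's greedy as head recursion over the two descending lists.
def pvF : List Int → List Int → Int
  | [], _ => 0
  | _ :: _, [] => 0
  | a :: A, b :: B => if a < b then 1 + pvF A B else pvF A (b :: B)

-- G: B's greedy as head recursion over the two ascending lists.
def pvG : List Int → List Int → Int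
  | [], _ => 0
  | _ :: _, [] => 0
  | a :: A, b :: B => if a < b then 1 + pvG A B else pvG (a :: A) B

-- The fold of port A computes pvF of the remaining suffix of Bs.
theorem pvFoldA (Bs : List Int) : ∀ (As : List Int) (c i : Int), 0 ≤ i →
    (As.foldl (fun (st : Int × Int) a =>
      match PySem.List.pyGet? Bs st.2 with
      | some bi => if a < bi then (st.1 + 1, st.2 + 1) else st
      | none => st) (c, i)).1 = c + pvF As (Bs.drop i.toNat) := by
  intro As
  induction As with
  | nil => intro c i _; simp [pvF]
  | cons a As ih =>
    intro c i hi
    rcases h : Bs.drop i.toNat with _ | ⟨b, rest⟩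
    · have hlen : Bs.length ≤ i.toNat := by
        have := congrArg List.length h; simp at this; omega
      have hnone : PySem.List.pyGet? Bs i = none := by
        rw [PySem.List.pyGet?_of_nonneg Bs hi]
        simp; omega
      simp only [List.foldl_cons, hnone]
      rw [ih c i hi, h]
      rcases As with _ | _ <;> simp [pvF]
    · have hget : Bs[i.toNat]? = some b := by
        have : (Bs.drop i.toNat).head? = some b := by rw [h]; rfl
        rwa [List.head?_drop] at this
      have hsome : PySem.List.pyGet? Bs i = some b := by
        rw [PySem.List.pyGet?_of_nonneg Bs hi]; exact hget
      simp only [List.foldl_cons, hsome]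
      by_cases hab : a < b
      · rw [if_pos hab, ih (c + 1) (i + 1) (by omega)]
        have hdrop : Bs.drop (i + 1).toNat = rest := by
          have : (i + 1).toNat = i.toNat + 1 := by omega
          rw [this, ← List.drop_drop, h]; rfl
        rw [hdrop]
        simp [pvF, hab]; ring
      · rw [if_neg hab, ih c i hi, h]
        simp [pvF, hab]

-- The while loop of port B computes pvG of the reversed remaining prefixes.
theorem pvLoopB (As Bs : List Int) : ∀ (j : Int), -1 ≤ j → ∀ (i c : Int), -1 ≤ i → i < (As.length : Int) →
    j < (Bs.length : Int) →
    altLoop As Bs i j c = c + pvG ((As.take (i + 1).toNat).reverse) ((Bs.take (j + 1).toNat).reverse) := by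
  intro j hj
  induction j, hj using Int.le_induction with
  | base =>
    intro i c _ _ _
    rw [altLoop, if_neg (by omega : ¬(0 ≤ i ∧ (0:Int) ≤ -1))]
    have h0 : ((-1 : Int) + 1).toNat = 0 := by decide
    rw [h0]
    rcases (As.take (i + 1).toNat).reverse with _ | _ <;> simp [pvG]
  | succ j hj ih =>
    intro i c hi1 hi2 hj2
    rw [altLoop]
    by_cases hi0 : 0 ≤ i
    · rw [if_pos (⟨hi0, by omega⟩ : 0 ≤ i ∧ 0 ≤ j + 1)]
      have hai : PySem.List.pyGet? As i = some (As[i.toNat]'(by omega)) := by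
        rw [PySem.List.pyGet?_of_nonneg As hi0]; simp [List.getElem?_eq_getElem (by omega : i.toNat < As.length)]
      have hbj : PySem.List.pyGet? Bs (j + 1) = some (Bs[(j+1).toNat]'(by omega)) := by
        rw [PySem.List.pyGet?_of_nonneg Bs (by omega)]; simp [List.getElem?_eq_getElem (by omega : (j+1).toNat < Bs.length)]
      rw [hai, hbj]; dsimp only
      have htA : (As.take (i + 1).toNat).reverse
          = As[i.toNat]'(by omega) :: (As.take i.toNat).reverse := by
        have : (i + 1).toNat = i.toNat + 1 := by omega
        rw [this, List.take_add_one, List.getElem?_eq_getElem (by omega : i.toNat < As.length)]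
        simp
      have htB : (Bs.take ((j + 1) + 1).toNat).reverse
          = Bs[(j+1).toNat]'(by omega) :: (Bs.take (j+1).toNat).reverse := by
        have : ((j + 1) + 1).toNat = (j + 1).toNat + 1 := by omega
        rw [this, List.take_add_one, List.getElem?_eq_getElem (by omega : (j+1).toNat < Bs.length)]
        simp
      by_cases hab : As[i.toNat]'(by omega) < Bs[(j+1).toNat]'(by omega)
      · rw [if_pos hab]
        have hj1 : (j + 1) - 1 = j := by ring
        rw [hj1, ih (i - 1) (c + 1) (by omega) (by omega) (by omega)]
        have : (i - 1) + 1 = i := by ring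
        rw [this, htA, htB]
        simp [pvG, hab]; ring
      · rw [if_neg hab]
        have hj1 : (j + 1) - 1 = j := by ring
        rw [hj1, ih i c hi1 hi2 (by omega)]
        rw [htA, htB]
        simp [pvG, hab]
    · rw [if_neg (by omega : ¬(0 ≤ i ∧ 0 ≤ j + 1))]
      have : (i + 1).toNat = 0 := by omega
      rw [this]; simp [pvG]

-- G ignores a maximal element appended at the back of its first list.
theorem pvG_drop_max : ∀ (Q P : List Int) (a : Int), (∀ q ∈ Q, q ≤ a) →
    pvG (P ++ [a]) Q = pvG P Q := by
  intro Q
  induction Q with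
  | nil => intro P a _; rcases P with _ | _ <;> simp [pvG]
  | cons q Q ih =>
    intro P a hq
    rcases P with _ | ⟨p, P⟩
    · have hlt : ¬ a < q := by have := hq q (by simp); omega
      have h2 : pvG ([] ++ [a]) Q = pvG [] Q := ih [] a (fun x hx => hq x (by simp [hx]))
      simpa [pvG, hlt] using h2
    · simp only [List.cons_append]
      by_cases hpq : p < q
      · simp only [pvG, if_pos hpq]
        rw [ih P a (fun x hx => hq x (by simp [hx]))]
      · simp only [pvG, if_neg hpq]
        exact ih (p :: P) a (fun x hx => hq x (by simp [hx]))

-- A single card a is beaten once by a list ending in a bigger card.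
theorem pvG_single (a b : Int) (hab : a < b) : ∀ (Q : List Int), pvG [a] (Q ++ [b]) = 1 := by
  intro Q
  induction Q with
  | nil => simp [pvG, hab]
  | cons q Q ih =>
    by_cases haq : a < q
    · simp [pvG, haq]
    · simpa [pvG, haq] using ih

-- Pairing the two maximal cards (a < b) wins exactly one more game.
theorem pvG_pair : ∀ (Q P : List Int) (a b : Int), a < b →
    (∀ x ∈ P, x ≤ a) → (∀ y ∈ Q, y ≤ b) →
    pvG (P ++ [a]) (Q ++ [b]) = 1 + pvG P Q := by
  intro Q
  induction Q with
  | nil =>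
    intro P a b hab hP _
    rcases P with _ | ⟨p, P⟩
    · simp [pvG, hab]
    · have hpb : p < b := by have := hP p (by simp); omega
      simp only [List.nil_append, List.cons_append, pvG, if_pos hpb]
      rcases P with _ | _ <;> simp [pvG]
  | cons q Q ih =>
    intro P a b hab hP hQ
    rcases P with _ | ⟨p, P⟩
    · rw [List.nil_append, pvG_single a b hab (q :: Q)]
      simp [pvG]
    · simp only [List.cons_append]
      by_cases hpq : p < q
      · simp only [pvG, if_pos hpq]
        rw [ih P a b hab (fun x hx => hP x (by simp [hx])) (fun y hy => hQ y (by simp [hy]))]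
      · simp only [pvG, if_neg hpq]
        exact ih (p :: P) a b hab hP (fun y hy => hQ y (by simp [hy]))

-- Core: on descending lists with |As| ≤ |Bs| the two greedies agree.
theorem pvFG : ∀ (As Bs : List Int), As.Pairwise (fun x y => y ≤ x) → Bs.Pairwise (fun x y => y ≤ x) →
    As.length ≤ Bs.length → pvF As Bs = pvG As.reverse Bs.reverse := by
  intro As
  induction As with
  | nil => intro Bs _ _ _; rcases Bs.reverse with _ | _ <;> simp [pvF, pvG]
  | cons a As ih =>
    intro Bs hA hB hlen
    rcases Bs with _ | ⟨b, B⟩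
    · simp at hlen
    · simp only [List.reverse_cons]
      by_cases hab : a < b
      · simp only [pvF, if_pos hab]
        rw [pvG_pair B.reverse As.reverse a b hab
          (fun x hx => (List.pairwise_cons.mp hA).1 x (by simpa using hx))
          (fun y hy => (List.pairwise_cons.mp hB).1 y (by simpa using hy))]
        rw [ih B (List.pairwise_cons.mp hA).2 (List.pairwise_cons.mp hB).2 (by simpa using hlen)]
      · simp only [pvF, if_neg hab]
        rw [pvG_drop_max (B.reverse ++ [b]) As.reverse a]
        · rw [ih (b :: B) (List.pairwise_cons.mp hA).2 hB (by simp at hlen ⊢; omega)]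
          simp
        · intro q hq
          rcases List.mem_append.mp hq with h | h
          · have := (List.pairwise_cons.mp hB).1 q (by simpa using h); omega
          · simp at h; omega

-- ===== VERDICT (by name: the statement is the Claim_ definition above) =====
theorem solution_spec : Claim_equal_solution := by
  intro A B _ hpre
  unfold Spec_solution solution solution_alt
  have hA := PySem.List.sorted_pairwise_rev A (fun x => x)
  have hB := PySem.List.sorted_pairwise_rev B (fun x => x)
  have hlenA : (PySem.List.sorted A (fun x => x) true).length = A.length := PySem.List.length_sorted ..
  have hlenB : (PySem.List.sorted B (fun x => x) true).length = B.length := PySem.List.length_sorted ..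
  set As := PySem.List.sorted A (fun x => x) true with hAs
  set Bs := PySem.List.sorted B (fun x => x) true with hBs
  rw [pvFoldA Bs As 0 0 le_rfl]
  rw [pvLoopB As Bs ((Bs.length : Int) - 1) (by omega) ((As.length : Int) - 1) 0
    (by omega) (by omega) (by omega)]
  have h1 : ((As.length : Int) - 1 + 1).toNat = As.length := by omega
  have h2 : ((Bs.length : Int) - 1 + 1).toNat = Bs.length := by omega
  rw [h1, h2, List.take_length, List.take_length]
  simp only [Int.toNat_zero, List.drop_zero, zero_add]
  exact pvFG As Bs hA hB (by rw [hlenA, hlenB]; exact hpre)
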